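-- pv_equiv track=rewrite | github.com/thesalmanx/tool | backend/main.py | clean_sql_query
-- ===== SOURCE A (Python) =====
-- def clean_sql_query(sql_query: str) -> str:
--     """Clean up the SQL query response from Gemini"""
--     sql_query = sql_query.strip()
--
--     if sql_query.startswith('```sql'):
--         sql_query = sql_query.replace('```sql', '').replace('```', '').strip()
--     elif sql_query.startswith('```'):
--         sql_query = sql_query.replace('```', '').strip()
--
--     lines = sql_query.split('\n')
--     sql_lines = []
--     found_select = False
--
--     for line in lines:
--         line = line.strip()
--         if line.upper().startswith('SELECT') or found_select:
--             found_select = True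
--             sql_lines.append(line)
--         elif any(keyword in line.upper() for keyword in ['FROM', 'WHERE', 'GROUP', 'ORDER', 'LIMIT', 'HAVING']):
--             sql_lines.append(line)
--
--     if sql_lines:
--         sql_query = '\n'.join(sql_lines)
--
--     return sql_query
-- ===== SOURCE B (Python) =====
-- KEYWORDS = ('FROM', 'WHERE', 'GROUP', 'ORDER', 'LIMIT', 'HAVING')
--
--
-- def _has_keyword(line):
--     u = line.upper()
--     return any(k in u for k in KEYWORDS)
--
--
-- def clean_sql_query(sql_query: str) -> str:
--     """Clean up the SQL query response from Gemini"""
--     sql_query = sql_query.strip()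
--
--     if sql_query.startswith('```sql'):
--         sql_query = sql_query.replace('```sql', '').replace('```', '').strip()
--     elif sql_query.startswith('```'):
--         sql_query = sql_query.replace('```', '').strip()
--
--     stripped = [line.strip() for line in sql_query.split('\n')]
--     idx = next((i for i, line in enumerate(stripped)
--                 if line.upper().startswith('SELECT')), None)
--
--     if idx is None:
--         result = [l for l in stripped if _has_keyword(l)]
--     else:
--         result = [l for l in stripped[:idx] if _has_keyword(l)] + stripped[idx:]
--
--     return '\n'.join(result) if result else sql_query
-- ===== Notes on version B (the rewrite author's own statement) =====
-- stated objective: alternative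
-- what changed: Replaces A's single stateful loop with a found_select flag by a pivot decomposition: find the index of the first SELECT line, then filter the lines before it by keyword and keep everything from it on (falling back to a pure keyword filter when no SELECT line exists).
import Mathlib
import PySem

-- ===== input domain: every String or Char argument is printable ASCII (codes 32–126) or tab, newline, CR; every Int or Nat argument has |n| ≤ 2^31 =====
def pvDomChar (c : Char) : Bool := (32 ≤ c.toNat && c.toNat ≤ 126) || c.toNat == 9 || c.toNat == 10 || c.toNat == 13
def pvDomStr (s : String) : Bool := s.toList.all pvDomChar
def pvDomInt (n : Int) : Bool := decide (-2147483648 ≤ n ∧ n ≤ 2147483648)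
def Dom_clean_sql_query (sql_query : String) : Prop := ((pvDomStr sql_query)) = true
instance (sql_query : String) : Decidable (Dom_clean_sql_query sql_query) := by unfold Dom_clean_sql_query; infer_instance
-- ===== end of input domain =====

-- Header: B replaces A's stateful found_select loop by a pivot decomposition
-- (find the first SELECT line, filter before it, keep everything after); same values, same cost.


-- ===== PORT A =====
def pvKeywords : List String := ["FROM", "WHERE", "GROUP", "ORDER", "LIMIT", "HAVING"]

-- markdown-fence stripping prelude, identical in A and B (same Python text in both)
def pvFence (sql_query : String) : String :=
  let sql_query := PySem.Str.strip sql_query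
  if PySem.Str.startswith sql_query "```sql" then
    PySem.Str.strip (PySem.Str.replace (PySem.Str.replace sql_query "```sql" "") "```" "")
  else if PySem.Str.startswith sql_query "```" then
    PySem.Str.strip (PySem.Str.replace sql_query "```" "")
  else sql_query

def clean_sql_query (sql_query : String) : String :=
  let sql_query := pvFence sql_query
  let lines := (PySem.Str.split? sql_query "\n").getD []
  -- state: (sql_lines, found_select)
  let st := lines.foldl (fun (st : List String × Bool) line =>
      let line := PySem.Str.strip line
      if PySem.Str.startswith (PySem.Str.upper line) "SELECT" || st.2 then
        (st.1 ++ [line], true)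
      else if pvKeywords.any (fun k => PySem.Str.isIn k (PySem.Str.upper line)) then
        (st.1 ++ [line], st.2)
      else st) ([], false)
  if st.1 ≠ [] then PySem.Str.join "\n" st.1 else sql_query

-- ===== PORT B =====
def pvHasKeyword (line : String) : Bool :=
  let u := PySem.Str.upper line
  pvKeywords.any (fun k => PySem.Str.isIn k u)

-- result-list selection: filter the lines before the first SELECT line, keep all lines from it on
def pvPick (stripped : List String) : List String :=
  match stripped.findIdx? (fun line => PySem.Str.startswith (PySem.Str.upper line) "SELECT") with
  | none => stripped.filter pvHasKeyword
  | some i => (stripped.take i).filter pvHasKeyword ++ stripped.drop i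

def clean_sql_query_alt (sql_query : String) : String :=
  let sql_query := pvFence sql_query
  let result := pvPick (((PySem.Str.split? sql_query "\n").getD []).map PySem.Str.strip)
  if result ≠ [] then PySem.Str.join "\n" result else sql_query

-- ===== PRECONDITION & SPEC =====
def Spec_clean_sql_query (sql_query : String) (out : String) : Prop := out = clean_sql_query_alt sql_query
instance (sql_query : String) (out : String) : Decidable (Spec_clean_sql_query sql_query out) := by unfold Spec_clean_sql_query; infer_instance

-- ===== CLAIM (what is proved, stated in full; the proofs are below) =====
def Claim_equal_clean_sql_query : Prop := ∀ (sql_query : String), Dom_clean_sql_query sql_query → Spec_clean_sql_query sql_query (clean_sql_query sql_query)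

-- ===== LEMMAS AND PROOFS =====

def pvSel (line : String) : Bool := PySem.Str.startswith (PySem.Str.upper line) "SELECT"

def pvStep (st : List String × Bool) (line : String) : List String × Bool :=
  if pvSel line || st.2 then (st.1 ++ [line], true)
  else if pvHasKeyword line then (st.1 ++ [line], st.2)
  else st

lemma foldl_pvStep_true (ls : List String) (acc : List String) :
    (ls.foldl pvStep (acc, true)).1 = acc ++ ls := by
  induction ls generalizing acc with
  | nil => simp
  | cons l ls ih => simp [pvStep, ih]

lemma foldl_pvStep_false (ls : List String) (acc : List String) :
    (ls.foldl pvStep (acc, false)).1 =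
      match ls.findIdx? pvSel with
      | none => acc ++ ls.filter pvHasKeyword
      | some i => acc ++ ((ls.take i).filter pvHasKeyword ++ ls.drop i) := by
  induction ls generalizing acc with
  | nil => simp
  | cons l ls ih =>
    rw [List.foldl_cons]
    by_cases hs : pvSel l
    · have h1 : pvStep (acc, false) l = (acc ++ [l], true) := by simp [pvStep, hs]
      rw [h1, foldl_pvStep_true]
      simp [List.findIdx?_cons, hs]
    · have h1 : pvStep (acc, false) l
          = ((if pvHasKeyword l then acc ++ [l] else acc), false) := by
        by_cases hk : pvHasKeyword l <;> simp [pvStep, hs, hk]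
      rw [h1, ih]
      cases h : ls.findIdx? pvSel with
      | none =>
        by_cases hk : pvHasKeyword l <;>
          simp [List.findIdx?_cons, hs, h, hk]
      | some i =>
        by_cases hk : pvHasKeyword l <;>
          simp [List.findIdx?_cons, hs, h, hk]

lemma foldl_pvStep_eq_pick (ls : List String) :
    (ls.foldl pvStep ([], false)).1 = pvPick ls := by
  rw [foldl_pvStep_false]; rfl

-- ===== VERDICT (by name: the statement is the Claim_ definition above) =====
theorem clean_sql_query_spec : Claim_equal_clean_sql_query := by
  intro s _
  unfold Spec_clean_sql_query clean_sql_query clean_sql_query_alt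
  have hstep : (fun (st : List String × Bool) line =>
      let line := PySem.Str.strip line
      if PySem.Str.startswith (PySem.Str.upper line) "SELECT" || st.2 then
        (st.1 ++ [line], true)
      else if pvKeywords.any (fun k => PySem.Str.isIn k (PySem.Str.upper line)) then
        (st.1 ++ [line], st.2)
      else st) = fun st line => pvStep st (PySem.Str.strip line) := by
    funext st line
    simp [pvStep, pvSel, pvHasKeyword]
  simp only [hstep]
  rw [show ∀ (ls : List String) (init : List String × Bool),
        ls.foldl (fun st line => pvStep st (PySem.Str.strip line)) init
          = (ls.map PySem.Str.strip).foldl pvStep init from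
        fun ls init => (List.foldl_map ..).symm]
  rw [foldl_pvStep_eq_pick]
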